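-- pv_equiv track=rewrite | github.com/Theoklytos/buddy-cli | bud/stages/blend.py | _format_slice
-- ===== SOURCE A (Python) =====
-- def _format_slice(
--     fname: str,
--     turns: list[dict],
--     offset: int,
--     total: int,
--     max_chars: int,
-- ) -> str:
--     """Format a single file's slice into annotated text."""
--     end = offset + len(turns) - 1
--     lines = [f"--- {fname}  turns {offset}–{end} / {total - 1} ---"]
--     prev_conv_id = None
--     for turn in turns:
--         if prev_conv_id is not None and turn["conv_id"] != prev_conv_id:
--             lines.append("[[ CONVERSATION BOUNDARY ]]")
--         text = turn["text"][:max_chars]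
--         lines.append(f"[{turn['sender']}]: {text}")
--         prev_conv_id = turn["conv_id"]
--     return "\n".join(lines)
-- ===== SOURCE B (Python) =====
-- def _format_slice(
--     fname: str,
--     turns: list[dict],
--     offset: int,
--     total: int,
--     max_chars: int,
-- ) -> str:
--     """Group-then-splice rewrite: split turns into consecutive conversation
--     runs, format each run into its lines, then splice the runs together with
--     boundary marker lines and prepend the header."""
--     end = offset + len(turns) - 1
--     header = f"--- {fname}  turns {offset}–{end} / {total - 1} ---"
--     groups = []
--     for turn in turns:
--         if groups and groups[-1][0] == turn["conv_id"]:
--             groups[-1][1].append(turn)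
--         else:
--             groups.append((turn["conv_id"], [turn]))
--     blocks = [
--         [f"[{t['sender']}]: {t['text'][:max_chars]}" for t in g]
--         for _, g in groups
--     ]
--     body = []
--     for block in blocks:
--         if body:
--             body.append("[[ CONVERSATION BOUNDARY ]]")
--         body.extend(block)
--     return "\n".join([header] + body)
-- ===== Notes on version B (the rewrite author's own statement) =====
-- stated objective: alternative
-- what changed: Replaces A's single pass that tracks the previous conv_id with a three-phase decomposition: group turns into consecutive conversation runs, format each run into its lines, then splice the runs with boundary lines.
-- outside the precondition, e.g. on _format_slice('f', [{'sender': 's', 'text': 'hi'}], 0, 1, 5): A raises KeyError, B raises KeyError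
import Mathlib
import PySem

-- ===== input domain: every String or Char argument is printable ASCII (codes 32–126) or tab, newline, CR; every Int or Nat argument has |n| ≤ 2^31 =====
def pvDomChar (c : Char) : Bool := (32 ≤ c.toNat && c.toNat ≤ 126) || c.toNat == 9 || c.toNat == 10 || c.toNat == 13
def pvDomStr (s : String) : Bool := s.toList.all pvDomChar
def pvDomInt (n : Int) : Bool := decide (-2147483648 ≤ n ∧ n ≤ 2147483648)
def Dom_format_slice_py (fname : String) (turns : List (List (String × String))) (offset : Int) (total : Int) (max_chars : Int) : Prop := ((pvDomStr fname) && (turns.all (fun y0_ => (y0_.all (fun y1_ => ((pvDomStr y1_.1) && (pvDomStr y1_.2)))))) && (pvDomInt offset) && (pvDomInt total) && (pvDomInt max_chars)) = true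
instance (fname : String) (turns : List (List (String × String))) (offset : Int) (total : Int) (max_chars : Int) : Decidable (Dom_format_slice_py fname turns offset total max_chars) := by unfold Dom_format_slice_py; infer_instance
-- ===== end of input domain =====

-- B replaces A's single pass tracking the previous conv_id by a group-then-splice
-- decomposition (consecutive runs, format each run, splice with boundary lines);
-- same cost, alternative structure.

-- ===== PORT A =====
def format_slice_py (fname : String) (turns : List (List (String × String))) (offset : Int) (total : Int) (max_chars : Int) : String :=
  let endIdx : Int := offset + (turns.length : Int) - 1
  let lines : List String := ["--- " ++ fname ++ "  turns " ++ PySem.Int.toStr offset ++ "–" ++ PySem.Int.toStr endIdx ++ " / " ++ PySem.Int.toStr (total - 1) ++ " ---"]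
  let res := turns.foldl (fun (st : List String × Option String) turn =>
      let ls := match st.2 with
        | some p => if PySem.Dict.getD (PySem.Dict.mk turn) "conv_id" "" ≠ p then st.1 ++ ["[[ CONVERSATION BOUNDARY ]]"] else st.1
        | none => st.1
      let text := PySem.Str.slice (PySem.Dict.getD (PySem.Dict.mk turn) "text" "") none (some max_chars)
      (ls ++ ["[" ++ PySem.Dict.getD (PySem.Dict.mk turn) "sender" "" ++ "]: " ++ text],
       some (PySem.Dict.getD (PySem.Dict.mk turn) "conv_id" "")))
    (lines, none)
  PySem.Str.join "\n" res.1

-- ===== PORT B =====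
def format_slice_py_alt (fname : String) (turns : List (List (String × String))) (offset : Int) (total : Int) (max_chars : Int) : String :=
  let endIdx : Int := offset + (turns.length : Int) - 1
  let header : String := "--- " ++ fname ++ "  turns " ++ PySem.Int.toStr offset ++ "–" ++ PySem.Int.toStr endIdx ++ " / " ++ PySem.Int.toStr (total - 1) ++ " ---"
  let groups : List (String × List (List (String × String))) :=
    turns.foldl (fun gs turn =>
      match gs.getLast? with
      | some last =>
          if last.1 = PySem.Dict.getD (PySem.Dict.mk turn) "conv_id" "" then
            gs.dropLast ++ [(last.1, last.2 ++ [turn])]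
          else
            gs ++ [(PySem.Dict.getD (PySem.Dict.mk turn) "conv_id" "", [turn])]
      | none => gs ++ [(PySem.Dict.getD (PySem.Dict.mk turn) "conv_id" "", [turn])]) []
  let blocks : List (List String) :=
    groups.map (fun g => g.2.map (fun t =>
      "[" ++ PySem.Dict.getD (PySem.Dict.mk t) "sender" "" ++ "]: " ++ PySem.Str.slice (PySem.Dict.getD (PySem.Dict.mk t) "text" "") none (some max_chars)))
  let body : List String :=
    blocks.foldl (fun body block => (if body ≠ [] then body ++ ["[[ CONVERSATION BOUNDARY ]]"] else body) ++ block) []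
  PySem.Str.join "\n" (header :: body)

-- ===== PRECONDITION & SPEC =====
-- Pre_ excludes exactly the inputs on which A raises KeyError: a turn dict missing
-- one of the keys "conv_id", "sender", "text".
def Pre_format_slice_py (fname : String) (turns : List (List (String × String))) (offset : Int) (total : Int) (max_chars : Int) : Prop :=
  ∀ t ∈ turns, PySem.Dict.contains (PySem.Dict.mk t) "conv_id" = true ∧
               PySem.Dict.contains (PySem.Dict.mk t) "sender" = true ∧
               PySem.Dict.contains (PySem.Dict.mk t) "text" = true
instance (fname : String) (turns : List (List (String × String))) (offset : Int) (total : Int) (max_chars : Int) : Decidable (Pre_format_slice_py fname turns offset total max_chars) := by unfold Pre_format_slice_py; infer_instance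

def pvWitness_format_slice_py : String × (List (List (String × String))) × Int × Int × Int :=
  ("f", [[("conv_id", "a"), ("sender", "s"), ("text", "hi")]], 0, 1, 5)

def Spec_format_slice_py (fname : String) (turns : List (List (String × String))) (offset : Int) (total : Int) (max_chars : Int) (out : String) : Prop := out = format_slice_py_alt fname turns offset total max_chars
instance (fname : String) (turns : List (List (String × String))) (offset : Int) (total : Int) (max_chars : Int) (out : String) : Decidable (Spec_format_slice_py fname turns offset total max_chars out) := by unfold Spec_format_slice_py; infer_instance

-- ===== CLAIM (what is proved, stated in full; the proofs are below) =====
def Claim_equal_format_slice_py : Prop := ∀ (fname : String) (turns : List (List (String × String))) (offset : Int) (total : Int) (max_chars : Int), Dom_format_slice_py fname turns offset total max_chars → Pre_format_slice_py fname turns offset total max_chars → Spec_format_slice_py fname turns offset total max_chars (format_slice_py fname turns offset total max_chars)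

-- ===== LEMMAS AND PROOFS =====

-- conv_id / formatted line of one turn
def pvCid (t : List (String × String)) : String := PySem.Dict.getD (PySem.Dict.mk t) "conv_id" ""
def pvFmt (mc : Int) (t : List (String × String)) : String :=
  "[" ++ PySem.Dict.getD (PySem.Dict.mk t) "sender" "" ++ "]: " ++ PySem.Str.slice (PySem.Dict.getD (PySem.Dict.mk t) "text" "") none (some mc)

-- reference body lines, as A produces them after the header
def pvSpecLines (mc : Int) : List (List (String × String)) → Option String → List String
  | [], _ => []
  | t :: ts, prev =>
      (match prev with
       | some p => if pvCid t ≠ p then ["[[ CONVERSATION BOUNDARY ]]"] else []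
       | none => []) ++ (pvFmt mc t :: pvSpecLines mc ts (some (pvCid t)))

theorem pvFoldA (mc : Int) (ts : List (List (String × String))) (ls : List String) (prev : Option String) :
    (ts.foldl (fun (st : List String × Option String) turn =>
      let ls := match st.2 with
        | some p => if PySem.Dict.getD (PySem.Dict.mk turn) "conv_id" "" ≠ p then st.1 ++ ["[[ CONVERSATION BOUNDARY ]]"] else st.1
        | none => st.1
      let text := PySem.Str.slice (PySem.Dict.getD (PySem.Dict.mk turn) "text" "") none (some mc)
      (ls ++ ["[" ++ PySem.Dict.getD (PySem.Dict.mk turn) "sender" "" ++ "]: " ++ text],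
       some (PySem.Dict.getD (PySem.Dict.mk turn) "conv_id" "")))
      (ls, prev)).1 = ls ++ pvSpecLines mc ts prev := by
  induction ts generalizing ls prev with
  | nil => simp [pvSpecLines]
  | cons t ts ih =>
      simp only [List.foldl_cons]
      rw [ih]
      cases prev with
      | none => simp [pvSpecLines, pvCid, pvFmt]
      | some p =>
          by_cases h : PySem.Dict.getD (PySem.Dict.mk t) "conv_id" "" = p <;>
            simp [pvSpecLines, pvCid, pvFmt, h]

-- consecutive-run grouping, written front-to-back
def pvMergeRuns (c : String) (g : List (List (String × String))) :
    List (List (String × String)) → List (String × List (List (String × String)))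
  | [] => [(c, g)]
  | t :: ts => if pvCid t = c then pvMergeRuns c (g ++ [t]) ts else (c, g) :: pvMergeRuns (pvCid t) [t] ts

def pvStepB (gs : List (String × List (List (String × String)))) (turn : List (String × String)) :
    List (String × List (List (String × String))) :=
  match gs.getLast? with
  | some last =>
      if last.1 = PySem.Dict.getD (PySem.Dict.mk turn) "conv_id" "" then
        gs.dropLast ++ [(last.1, last.2 ++ [turn])]
      else
        gs ++ [(PySem.Dict.getD (PySem.Dict.mk turn) "conv_id" "", [turn])]
  | none => gs ++ [(PySem.Dict.getD (PySem.Dict.mk turn) "conv_id" "", [turn])]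

theorem pvFoldB (ts : List (List (String × String))) (gs : List (String × List (List (String × String))))
    (c : String) (g : List (List (String × String))) :
    (ts.foldl pvStepB (gs ++ [(c, g)])) = gs ++ pvMergeRuns c g ts := by
  induction ts generalizing gs c g with
  | nil => simp [pvMergeRuns]
  | cons t ts ih =>
      simp only [List.foldl_cons, pvMergeRuns]
      by_cases h : pvCid t = c
      · have : pvStepB (gs ++ [(c, g)]) t = gs ++ [(c, g ++ [t])] := by
          simp [pvStepB, pvCid] at *
          simp [h]
        rw [this, ih, if_pos h]
      · have : pvStepB (gs ++ [(c, g)]) t = (gs ++ [(c, g)]) ++ [(pvCid t, [t])] := by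
          simp [pvStepB, pvCid] at *
          intro hh; exact absurd hh.symm h
        rw [this, if_neg h]
        rw [show (gs ++ [(c,g)]) ++ [(pvCid t, [t])] = gs ++ ([(c,g)] ++ [(pvCid t, [t])]) by simp]
        rw [List.append_assoc] at *
        have := ih (gs ++ [(c, g)]) (pvCid t) [t]
        simpa using this

-- every run produced by pvMergeRuns keeps its head conversation and extends its head group
theorem pvMergeRuns_head (ts : List (List (String × String))) (c : String) (g : List (List (String × String))) :
    ∃ ext rest, pvMergeRuns c g ts = (c, g ++ ext) :: rest := by
  induction ts generalizing g with
  | nil => exact ⟨[], [], by simp [pvMergeRuns]⟩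
  | cons t ts ih =>
      by_cases h : pvCid t = c
      · obtain ⟨e, r, hr⟩ := ih (g ++ [t])
        exact ⟨[t] ++ e, r, by simp [pvMergeRuns, h, hr]⟩
      · exact ⟨[], pvMergeRuns (pvCid t) [t] ts, by simp [pvMergeRuns, h]⟩

def pvBlockOf (mc : Int) (g : String × List (List (String × String))) : List String :=
  g.2.map (pvFmt mc)

-- the splice loop over blocks, once the accumulator is nonempty
theorem pvFoldC (bs : List (List String)) (body : List String) (h : body ≠ []) :
    bs.foldl (fun body block => (if body ≠ [] then body ++ ["[[ CONVERSATION BOUNDARY ]]"] else body) ++ block) body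
      = body ++ bs.flatMap (fun b => "[[ CONVERSATION BOUNDARY ]]" :: b) := by
  induction bs generalizing body with
  | nil => simp
  | cons b bs ih =>
      simp only [List.foldl_cons, if_pos h]
      rw [ih _ (by simp)]
      simp

-- the spliced blocks of the runs of (c,g)·ts are exactly A's tail lines after (some c)
theorem pvSplice_mergeRuns (mc : Int) (ts : List (List (String × String))) (c : String)
    (g : List (List (String × String))) (hg : g ≠ []) :
    (((pvMergeRuns c g ts).map (pvBlockOf mc)).foldl
        (fun body block => (if body ≠ [] then body ++ ["[[ CONVERSATION BOUNDARY ]]"] else body) ++ block) [])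
      = g.map (pvFmt mc) ++ pvSpecLines mc ts (some c) := by
  induction ts generalizing c g with
  | nil =>
      simp [pvMergeRuns, pvBlockOf, pvSpecLines, hg]
  | cons t ts ih =>
      by_cases h : pvCid t = c
      · rw [show pvMergeRuns c g (t :: ts) = pvMergeRuns c (g ++ [t]) ts by simp [pvMergeRuns, h]]
        rw [ih c (g ++ [t]) (by simp)]
        simp [pvSpecLines, h]
      · rw [show pvMergeRuns c g (t :: ts) = (c, g) :: pvMergeRuns (pvCid t) [t] ts by simp [pvMergeRuns, h]]
        obtain ⟨e, r, hr⟩ := pvMergeRuns_head ts (pvCid t) [t]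
        simp only [List.map_cons, List.foldl_cons]
        rw [if_neg (by simp), show ([] : List String) ++ pvBlockOf mc (c, g) = pvBlockOf mc (c, g) from rfl]
        rw [pvFoldC _ _ (by simp [pvBlockOf, hg])]
        rw [hr]
        have htail := ih (pvCid t) [t] (by simp)
        rw [hr] at htail
        simp only [List.map_cons, List.foldl_cons, pvBlockOf] at htail ⊢
        rw [if_neg (by simp)] at htail
        simp only [List.nil_append] at htail
        rw [pvFoldC _ _ (by simp)] at htail
        simp only [List.map_cons, List.map_nil, List.cons_append,
          List.nil_append, List.cons.injEq] at htail
        simp [pvSpecLines, h, htail.2]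

theorem pvBodyB (mc : Int) (ts : List (List (String × String))) :
    ((ts.foldl pvStepB []).map (pvBlockOf mc)).foldl
        (fun body block => (if body ≠ [] then body ++ ["[[ CONVERSATION BOUNDARY ]]"] else body) ++ block) []
      = pvSpecLines mc ts none := by
  cases ts with
  | nil => simp [pvSpecLines]
  | cons t ts =>
      have h0 : pvStepB [] t = [] ++ [(pvCid t, [t])] := by simp [pvStepB, pvCid]
      simp only [List.foldl_cons, h0]
      rw [pvFoldB]
      simp only [List.nil_append]
      rw [pvSplice_mergeRuns mc ts (pvCid t) [t] (by simp)]
      simp [pvSpecLines]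

-- ===== VERDICT (by name: the statement is the Claim_ definition above) =====
theorem format_slice_py_spec : Claim_equal_format_slice_py := by
  intro fname turns offset total mc _ _
  simp only [Spec_format_slice_py, format_slice_py, format_slice_py_alt]
  rw [pvFoldA mc turns _ none]
  rw [List.singleton_append]
  refine congrArg (PySem.Str.join "\n") (congrArg (List.cons _) ?_)
  exact (pvBodyB mc turns).symm
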